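-- pv_equiv track=rewrite | github.com/Lufftre/AdventOfCode | 2015/day5.py | is_nice2
-- ===== SOURCE A (Python) =====
-- def is_nice2(line):
--     pair = False
--     repeat = False
--
--     for i in range(len(line) - 2):
--         if line[i:i+2] in line[i+2:]:
--             pair = True
--         if line[i] == line[i + 2]:
--             repeat = True
--
--     return pair and repeat
-- ===== SOURCE B (Python) =====
-- def is_nice2(line):
--     n = len(line)
--     first = {}
--     pair = False
--     repeat = False
--     for i in range(n - 1):
--         p = line[i:i + 2]
--         if p in first:
--             if first[p] <= i - 2:
--                 pair = True
--         else:
--             first[p] = i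
--         if i + 2 < n and line[i] == line[i + 2]:
--             repeat = True
--     return pair and repeat
-- ===== Notes on version B (the rewrite author's own statement) =====
-- stated objective: faster
-- what changed: A rescans the whole remaining suffix for each index to find a repeated pair; B makes a single pass keeping a dict of each 2-char pair's first index (a repeat with gap >= 2 is detected against that first index) and checks the xyx condition in the same pass.
import Mathlib
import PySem

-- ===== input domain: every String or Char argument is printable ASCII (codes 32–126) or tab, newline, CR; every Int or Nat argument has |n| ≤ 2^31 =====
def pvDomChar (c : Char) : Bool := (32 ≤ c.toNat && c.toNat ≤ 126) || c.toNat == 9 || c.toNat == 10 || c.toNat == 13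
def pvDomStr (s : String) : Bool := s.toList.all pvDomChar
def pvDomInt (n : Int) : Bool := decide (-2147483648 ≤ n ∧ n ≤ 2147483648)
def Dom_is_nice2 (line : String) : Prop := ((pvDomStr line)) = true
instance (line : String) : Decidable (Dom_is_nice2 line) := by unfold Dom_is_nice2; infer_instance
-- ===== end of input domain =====

-- B replaces A's quadratic-scan substring test per index by a single pass with a dict of each
-- pair's first index (objective: faster, asymptotic).

-- ===== PORT A =====
def is_nice2 (line : String) : Bool :=
  let l := line.toList
  let st := (PySem.List.pyRange 0 ((l.length : Int) - 2)).foldl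
    (fun (st : Bool × Bool) i =>
      (if PySem.Chars.isIn (PySem.List.slice l (some i) (some (i + 2)))
            (PySem.List.slice l (some (i + 2)) none) then true else st.1,
       if PySem.List.pyGetD l i ' ' == PySem.List.pyGetD l (i + 2) ' ' then true else st.2))
    (false, false)
  st.1 && st.2

-- ===== PORT B =====
def is_nice2_alt (line : String) : Bool :=
  let l := line.toList
  let n : Int := l.length
  let st := (PySem.List.pyRange 0 (n - 1)).foldl
    (fun (st : PySem.Dict (List Char) Int × Bool × Bool) i =>
      let p := PySem.List.slice l (some i) (some (i + 2))
      let st1 :=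
        match PySem.Dict.get? st.1 p with
        | some j => (st.1, if j ≤ i - 2 then true else st.2.1, st.2.2)
        | none => (PySem.Dict.insert st.1 p i, st.2.1, st.2.2)
      (st1.1, st1.2.1,
        if decide (i + 2 < n) && (PySem.List.pyGetD l i ' ' == PySem.List.pyGetD l (i + 2) ' ')
        then true else st1.2.2))
    (PySem.Dict.empty, false, false)
  st.2.1 && st.2.2

-- ===== PRECONDITION & SPEC =====
def Spec_is_nice2 (line : String) (out : Bool) : Prop := out = is_nice2_alt line
instance (line : String) (out : Bool) : Decidable (Spec_is_nice2 line out) := by unfold Spec_is_nice2; infer_instance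

-- ===== CLAIM (what is proved, stated in full; the proofs are below) =====
def Claim_equal_is_nice2 : Prop := ∀ (line : String), Dom_is_nice2 line → Spec_is_nice2 line (is_nice2 line)

-- ===== LEMMAS AND PROOFS =====

-- the two-character window of l at index a
def pairAt (l : List Char) (a : Nat) : List Char := (l.drop a).take 2

-- some window repeats with a gap of ≥ 2, both window starts below k
def PairUpto (l : List Char) (k : Nat) : Prop :=
  ∃ a b : Nat, b < k ∧ a + 2 ≤ b ∧ pairAt l a = pairAt l b

def RepAt (l : List Char) (a : Nat) : Prop :=
  a + 3 ≤ l.length ∧ l.getD a ' ' = l.getD (a + 2) ' '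

def RepUpto (l : List Char) (k : Nat) : Prop := ∃ a : Nat, a < k ∧ RepAt l a

-- the dict holds exactly the first index of each window seen so far
def DictInv (l : List Char) (k : Nat) (d : PySem.Dict (List Char) Int) : Prop :=
  ∀ (p : List Char) (j : Int), PySem.Dict.get? d p = some j ↔
    ∃ a : Nat, (a : Int) = j ∧ a < k ∧ pairAt l a = p ∧ ∀ b < a, pairAt l b ≠ p

-- B's loop body, named for the proofs (definitionally the lambda inside is_nice2_alt)
def bstep (l : List Char) (st : PySem.Dict (List Char) Int × Bool × Bool) (i : Int) :
    PySem.Dict (List Char) Int × Bool × Bool :=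
  let p := PySem.List.slice l (some i) (some (i + 2))
  let st1 :=
    match PySem.Dict.get? st.1 p with
    | some j => (st.1, if j ≤ i - 2 then true else st.2.1, st.2.2)
    | none => (PySem.Dict.insert st.1 p i, st.2.1, st.2.2)
  (st1.1, st1.2.1,
    if decide (i + 2 < (l.length : Int)) &&
       (PySem.List.pyGetD l i ' ' == PySem.List.pyGetD l (i + 2) ' ')
    then true else st1.2.2)

lemma slice_pairAt (l : List Char) (k : Nat) :
    PySem.List.slice l (some (k : Int)) (some ((k : Int) + 2)) = pairAt l k := by
  have h : ((k : Int) + 2) = ((k + 2 : Nat) : Int) := by push_cast; ring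
  rw [h, PySem.List.slice_natCast, pairAt]
  congr 1
  omega

lemma length_pairAt (l : List Char) (a : Nat) :
    (pairAt l a).length = min 2 (l.length - a) := by
  simp [pairAt]

lemma bloop (l : List Char) (k : Nat) :
    DictInv l k (((List.range k).map (fun a : Nat => (a : Int))).foldl (bstep l)
        (PySem.Dict.empty, false, false)).1 ∧
    ((((List.range k).map (fun a : Nat => (a : Int))).foldl (bstep l)
        (PySem.Dict.empty, false, false)).2.1 = true ↔ PairUpto l k) ∧
    ((((List.range k).map (fun a : Nat => (a : Int))).foldl (bstep l)
        (PySem.Dict.empty, false, false)).2.2 = true ↔ RepUpto l k) := by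
  induction k with
  | zero =>
      refine ⟨?_, ?_, ?_⟩
      · intro p j
        simp [PySem.Dict.get?_empty]
      · simp [PairUpto]
      · simp [RepUpto]
  | succ k ih =>
      obtain ⟨hd, hp, hr⟩ := ih
      set S := ((List.range k).map (fun a : Nat => (a : Int))).foldl (bstep l)
        (PySem.Dict.empty, false, false) with hS
      rw [List.range_succ, List.map_append, List.foldl_append]
      simp only [List.map_cons, List.map_nil, List.foldl_cons, List.foldl_nil]
      rw [show ((List.range k).map (fun a : Nat => (a : Int))).foldl (bstep l)
        (PySem.Dict.empty, false, false) = S from rfl]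
      have hpk : PySem.List.slice l (some (k : Int)) (some ((k : Int) + 2)) = pairAt l k :=
        slice_pairAt l k
      have hrep : ∀ (b : Bool),
          ((if decide ((k : Int) + 2 < (l.length : Int)) &&
              (PySem.List.pyGetD l (k : Int) ' ' == PySem.List.pyGetD l ((k : Int) + 2) ' ')
            then true else b) = true ↔ (RepAt l k ∨ b = true)) := by
        intro b
        have h2 : ((k : Int) + 2) = ((k + 2 : Nat) : Int) := by push_cast; ring
        rw [h2, PySem.List.pyGetD_natCast, PySem.List.pyGetD_natCast]
        split_ifs with h
        · simp only [Bool.and_eq_true, decide_eq_true_eq, beq_iff_eq] at h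
          constructor
          · intro _; left; exact ⟨by omega, h.2⟩
          · intro _; rfl
        · simp only [Bool.and_eq_true, decide_eq_true_eq, beq_iff_eq, not_and_or] at h
          constructor
          · intro hb; right; exact hb
          · rintro (⟨h1, h2'⟩ | hb)
            · exfalso
              rcases h with h | h
              · omega
              · exact h h2'
            · exact hb
      have hrepstep : ∀ (b : Bool), (b = true ↔ RepUpto l k) →
          ((if decide ((k : Int) + 2 < (l.length : Int)) &&
              (PySem.List.pyGetD l (k : Int) ' ' == PySem.List.pyGetD l ((k : Int) + 2) ' ')
            then true else b) = true ↔ RepUpto l (k + 1)) := by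
        intro b hb
        rw [hrep b, hb]
        constructor
        · rintro (h | ⟨a, ha, hra⟩)
          · exact ⟨k, Nat.lt_succ_self k, h⟩
          · exact ⟨a, by omega, hra⟩
        · rintro ⟨a, ha, hra⟩
          rcases Nat.lt_succ_iff_lt_or_eq.mp ha with h | h
          · right; exact ⟨a, h, hra⟩
          · left; exact h ▸ hra
      rcases hcase : PySem.Dict.get? S.1 (pairAt l k) with _ | j
      · -- window unseen: insert, flags' pair part unchanged
        have hnew : ∀ a : Nat, a < k → pairAt l a ≠ pairAt l k := by
          intro a ha hpa
          -- the first occurrence below k would be in the dict, contradicting `none`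
          classical
          have hex : ∃ a', pairAt l a' = pairAt l k ∧ a' < k := ⟨a, hpa, ha⟩
          have hspec := Nat.find_spec hex
          have hle : Nat.find hex ≤ a := Nat.find_min' hex ⟨hpa, ha⟩
          have hsome : PySem.Dict.get? S.1 (pairAt l k) = some ((Nat.find hex : Nat) : Int) := by
            refine (hd (pairAt l k) _).mpr ⟨Nat.find hex, rfl, hspec.2, hspec.1, ?_⟩
            intro b hb hpb
            exact Nat.find_min hex hb ⟨hpb, by omega⟩
          rw [hcase] at hsome
          simp at hsome
        refine ⟨?_, ?_, ?_⟩
        · -- DictInv after insert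
          intro p j
          simp only [bstep, hpk, hcase]
          rw [PySem.Dict.get?_insert]
          split_ifs with hpe
          · constructor
            · rintro h
              injection h with h
              refine ⟨k, h, Nat.lt_succ_self k, hpe.symm, ?_⟩
              intro b hb hpb
              exact hnew b hb (hpb.trans hpe)
            · rintro ⟨a, haj, hak, hap, hfirst⟩
              rcases Nat.lt_succ_iff_lt_or_eq.mp hak with h | h
              · exact absurd (hap.trans hpe) (hnew a h)
              · subst h; exact congrArg some haj
          · rw [hd p j]
            constructor
            · rintro ⟨a, haj, hak, hap, hfirst⟩
              exact ⟨a, haj, by omega, hap, hfirst⟩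
            · rintro ⟨a, haj, hak, hap, hfirst⟩
              rcases Nat.lt_succ_iff_lt_or_eq.mp hak with h | h
              · exact ⟨a, haj, h, hap, hfirst⟩
              · refine absurd ?_ hpe
                rw [← h] at *
                exact hap.symm
        · -- pair flag unchanged, PairUpto (k+1) ↔ PairUpto k
          simp only [bstep, hpk, hcase]
          rw [hp]
          constructor
          · rintro ⟨a, b, hbk, hab, hpab⟩
            exact ⟨a, b, by omega, hab, hpab⟩
          · rintro ⟨a, b, hbk, hab, hpab⟩
            rcases Nat.lt_succ_iff_lt_or_eq.mp hbk with h | h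
            · exact ⟨a, b, h, hab, hpab⟩
            · subst h
              exact absurd hpab (hnew a (by omega))
        · simp only [bstep, hpk, hcase]
          exact hrepstep S.2.2 hr
      · -- window seen before at its first index j = a0
        obtain ⟨a0, ha0j, ha0k, ha0p, ha0first⟩ := (hd (pairAt l k) j).mp hcase
        refine ⟨?_, ?_, ?_⟩
        · intro p j'
          simp only [bstep, hpk, hcase]
          rw [hd p j']
          constructor
          · rintro ⟨a, haj, hak, hap, hfirst⟩
            exact ⟨a, haj, by omega, hap, hfirst⟩
          · rintro ⟨a, haj, hak, hap, hfirst⟩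
            rcases Nat.lt_succ_iff_lt_or_eq.mp hak with h | h
            · exact ⟨a, haj, h, hap, hfirst⟩
            · -- a = k is impossible: a0 < k is an earlier occurrence of the same window
              exfalso
              have hpk' : pairAt l k = p := by rw [← h]; exact hap
              exact hfirst a0 (by omega) (ha0p.trans hpk')
        · simp only [bstep, hpk, hcase]
          split_ifs with hj
          · -- j ≤ k - 2 : a0 + 2 ≤ k, new witness (a0, k)
            simp only [true_iff]
            exact ⟨a0, k, Nat.lt_succ_self k, by omega, ha0p⟩
          · rw [hp]
            constructor
            · rintro ⟨a, b, hbk, hab, hpab⟩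
              exact ⟨a, b, by omega, hab, hpab⟩
            · rintro ⟨a, b, hbk, hab, hpab⟩
              rcases Nat.lt_succ_iff_lt_or_eq.mp hbk with h | h
              · exact ⟨a, b, h, hab, hpab⟩
              · subst h
                -- pairAt a = pairAt k with a + 2 ≤ k: minimality of a0 gives a0 ≤ a, so j ≤ k - 2
                exfalso
                have : ¬ a < a0 := fun hlt => ha0first a hlt hpab
                omega
        · simp only [bstep, hpk, hcase]
          exact hrepstep S.2.2 hr

lemma pyRange_len_sub_one (l : List Char) :
    PySem.List.pyRange 0 ((l.length : Int) - 1) =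
      (List.range (l.length - 1)).map (fun a : Nat => (a : Int)) := by
  rw [PySem.List.pyRange_one]
  have h : ((l.length : Int) - 1 - 0).toNat = l.length - 1 := by omega
  rw [h]
  simp

lemma alt_iff (line : String) :
    is_nice2_alt line = true ↔
      (PairUpto line.toList (line.toList.length - 1) ∧
       RepUpto line.toList (line.toList.length - 1)) := by
  obtain ⟨_, hp, hr⟩ := bloop line.toList (line.toList.length - 1)
  have e : is_nice2_alt line =
      (((PySem.List.pyRange 0 ((line.toList.length : Int) - 1)).foldl (bstep line.toList)
          (PySem.Dict.empty, false, false)).2.1 &&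
       ((PySem.List.pyRange 0 ((line.toList.length : Int) - 1)).foldl (bstep line.toList)
          (PySem.Dict.empty, false, false)).2.2) := rfl
  rw [e, pyRange_len_sub_one line.toList, Bool.and_eq_true, hp, hr]

lemma a_iff (line : String) :
    is_nice2 line = true ↔
      ((∃ i : Int, 0 ≤ i ∧ i < (line.toList.length : Int) - 2 ∧
          PySem.Chars.isIn (PySem.List.slice line.toList (some i) (some (i + 2)))
            (PySem.List.slice line.toList (some (i + 2)) none) = true) ∧
       (∃ i : Int, 0 ≤ i ∧ i < (line.toList.length : Int) - 2 ∧
          (PySem.List.pyGetD line.toList i ' ' == PySem.List.pyGetD line.toList (i + 2) ' ') = true)) := by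
  have e : is_nice2 line =
      (((PySem.List.pyRange 0 ((line.toList.length : Int) - 2)).foldl
          (fun (st : Bool × Bool) i =>
            (if PySem.Chars.isIn (PySem.List.slice line.toList (some i) (some (i + 2)))
                  (PySem.List.slice line.toList (some (i + 2)) none) then true else st.1,
             if PySem.List.pyGetD line.toList i ' ' ==
                  PySem.List.pyGetD line.toList (i + 2) ' ' then true else st.2))
          (false, false)).1 &&
       ((PySem.List.pyRange 0 ((line.toList.length : Int) - 2)).foldl
          (fun (st : Bool × Bool) i =>
            (if PySem.Chars.isIn (PySem.List.slice line.toList (some i) (some (i + 2)))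
                  (PySem.List.slice line.toList (some (i + 2)) none) then true else st.1,
             if PySem.List.pyGetD line.toList i ' ' ==
                  PySem.List.pyGetD line.toList (i + 2) ' ' then true else st.2))
          (false, false)).2) := rfl
  rw [e, PySem.List.foldl_prod_mk
      (f := fun acc i => if PySem.Chars.isIn
          (PySem.List.slice line.toList (some i) (some (i + 2)))
          (PySem.List.slice line.toList (some (i + 2)) none) then true else acc)
      (g := fun acc i => if PySem.List.pyGetD line.toList i ' ' ==
          PySem.List.pyGetD line.toList (i + 2) ' ' then true else acc),
    PySem.List.foldl_if_true_eq, PySem.List.foldl_if_true_eq]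
  simp only [Bool.false_or, Bool.and_eq_true, List.any_eq_true,
    PySem.List.mem_pyRange_one, and_assoc]

lemma cast_add_two (a : Nat) : ((a : Int) + 2) = ((a + 2 : Nat) : Int) := by push_cast; ring

lemma pair_bridge (l : List Char) :
    (∃ i : Int, 0 ≤ i ∧ i < (l.length : Int) - 2 ∧
        PySem.Chars.isIn (PySem.List.slice l (some i) (some (i + 2)))
          (PySem.List.slice l (some (i + 2)) none) = true) ↔
      PairUpto l (l.length - 1) := by
  constructor
  · rintro ⟨i, h0, h2, hin⟩
    lift i to Nat using h0 with a
    have ha2 : a + 2 < l.length := by omega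
    rw [slice_pairAt, cast_add_two, PySem.List.slice_from_natCast] at hin
    obtain ⟨j, hpre⟩ := (PySem.Chars.exists_prefix_drop_iff_isIn _ _).mpr hin
    rw [List.drop_drop] at hpre
    have hlen_a : (pairAt l a).length = 2 := by rw [length_pairAt]; omega
    have hble : 2 ≤ (List.drop (a + 2 + j) l).length := by
      have h := hpre.length_le
      rw [hlen_a] at h
      exact h
    rw [List.length_drop] at hble
    have htake := List.prefix_iff_eq_take.mp hpre
    rw [hlen_a] at htake
    exact ⟨a, a + 2 + j, by omega, by omega, htake⟩
  · rintro ⟨a, b, hb, hab, hpab⟩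
    have hblen : b + 2 ≤ l.length := by omega
    refine ⟨(a : Int), by omega, by omega, ?_⟩
    rw [slice_pairAt, cast_add_two, PySem.List.slice_from_natCast]
    apply (PySem.Chars.exists_prefix_drop_iff_isIn _ _).mp
    refine ⟨b - (a + 2), ?_⟩
    rw [List.drop_drop, show a + 2 + (b - (a + 2)) = b from by omega,
      List.prefix_iff_eq_take]
    have h1 : (pairAt l a).length = 2 := by rw [length_pairAt]; omega
    rw [h1, hpab]
    rfl

lemma rep_bridge (l : List Char) :
    (∃ i : Int, 0 ≤ i ∧ i < (l.length : Int) - 2 ∧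
        (PySem.List.pyGetD l i ' ' == PySem.List.pyGetD l (i + 2) ' ') = true) ↔
      RepUpto l (l.length - 1) := by
  constructor
  · rintro ⟨i, h0, h2, hc⟩
    lift i to Nat using h0 with a
    rw [cast_add_two, PySem.List.pyGetD_natCast, PySem.List.pyGetD_natCast, beq_iff_eq] at hc
    exact ⟨a, by omega, by omega, hc⟩
  · rintro ⟨a, hak, hlen, heq⟩
    refine ⟨(a : Int), by omega, by omega, ?_⟩
    rw [cast_add_two, PySem.List.pyGetD_natCast, PySem.List.pyGetD_natCast, beq_iff_eq]
    exact heq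

-- ===== VERDICT (by name: the statement is the Claim_ definition above) =====
theorem is_nice2_spec : Claim_equal_is_nice2 := by
  intro line _
  unfold Spec_is_nice2
  rw [Bool.eq_iff_iff, a_iff, alt_iff, pair_bridge, rep_bridge]
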